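-- pv_equiv track=rewrite | github.com/syncerpn/leetcode | 3679_min_discards_to_balance_inventory.py | minArrivalsToDiscard
-- ===== SOURCE A (Python) =====
-- from typing import List
--
-- def minArrivalsToDiscard(arrivals: List[int], w: int, m: int) -> int:
--     n = len(arrivals)
--     f = [False] * n
--     d = {}
--     for i, a in enumerate(arrivals):
--         if a not in d:
--             d[a] = 0
--         d[a] += 1
--         if i >= w:
--             if not f[i-w]:
--                 d[arrivals[i-w]] -= 1
--         if d[a] > m:
--             f[i] = True
--             d[a] -= 1
--     return sum(f)
-- ===== SOURCE B (Python) =====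
-- def minArrivalsToDiscard(arrivals, w, m):
--     # group positions by value, then solve each value independently with a sliding window of kept positions
--     index = {}
--     for p, a in enumerate(arrivals):
--         index[a] = index.get(a, []) + [p]
--     total = 0
--     for positions in index.values():
--         kept = []
--         for p in positions:
--             kept = [q for q in kept if q > p - w]
--             if len(kept) >= m:
--                 total += 1
--             else:
--                 kept.append(p)
--     return total
-- ===== Notes on version B (the rewrite author's own statement) =====
-- stated objective: alternative
-- what changed: Replaces A's single chronological pass over a boolean flag array plus a lazily-decremented count dict by an index-then-per-value decomposition: B first groups the positions of each value, then for each value independently slides a window of kept positions over its position list, summing the discards.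
-- outside the precondition, e.g. on minArrivalsToDiscard([1, 1], 0, 0): A returns 0, B returns 2
import Mathlib
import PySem

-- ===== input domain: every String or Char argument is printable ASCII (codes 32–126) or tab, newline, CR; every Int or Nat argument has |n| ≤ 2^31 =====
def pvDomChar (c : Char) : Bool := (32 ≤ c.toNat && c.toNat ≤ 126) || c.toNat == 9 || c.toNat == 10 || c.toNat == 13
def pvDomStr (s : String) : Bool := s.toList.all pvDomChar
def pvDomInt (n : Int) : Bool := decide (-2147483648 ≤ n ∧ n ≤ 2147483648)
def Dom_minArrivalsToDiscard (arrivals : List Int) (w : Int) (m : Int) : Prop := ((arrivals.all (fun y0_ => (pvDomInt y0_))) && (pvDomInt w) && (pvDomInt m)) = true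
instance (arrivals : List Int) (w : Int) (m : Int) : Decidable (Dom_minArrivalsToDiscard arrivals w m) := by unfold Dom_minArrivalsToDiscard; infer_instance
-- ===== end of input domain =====

-- B replaces A's chronological flags+count-dict pass by an index of positions per value
-- and an independent sliding window per value (alternative decomposition, same results).

-- ===== PORT A =====
-- the body of A's for-loop (reads f/d from st, writes them back)
def pvAStep (arrivals : List Int) (w : Int) (m : Int)
    (st : List Bool × PySem.Dict Int Int) (ia : Int × Int) : List Bool × PySem.Dict Int Int :=
  let f := st.1
  let d := st.2
  let i := ia.1
  let a := ia.2
  let d := if d.contains a then d else d.insert a 0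
  let d := d.insert a (d.getD a 0 + 1)
  let d := if w ≤ i then
             (if !(PySem.List.pyGetD f (i - w) false) then
                d.insert (PySem.List.pyGetD arrivals (i - w) 0)
                         (d.getD (PySem.List.pyGetD arrivals (i - w) 0) 0 - 1)
              else d)
           else d
  if m < d.getD a 0 then
    (PySem.List.pySetD f i true, d.insert a (d.getD a 0 - 1))
  else (f, d)

def minArrivalsToDiscard (arrivals : List Int) (w : Int) (m : Int) : Int :=
  let n := arrivals.length
  let res := (PySem.List.enumerate arrivals).foldl (pvAStep arrivals w m)
    (List.replicate n false, PySem.Dict.empty)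
  ((res.1.count true : Nat) : Int)

-- ===== PORT B =====
-- one step of B's inner loop: expire positions out of the window, then discard or keep p
def pvAltInner (w m : Int) (st : List Int × Int) (p : Int) : List Int × Int :=
  let kept := st.1.filter (fun q => decide (p - w < q))
  if m ≤ (kept.length : Int) then (kept, st.2 + 1) else (kept ++ [p], st.2)

def minArrivalsToDiscard_alt (arrivals : List Int) (w : Int) (m : Int) : Int :=
  let index := (PySem.List.enumerate arrivals).foldl
    (fun (d : PySem.Dict Int (List Int)) ia => d.modify ia.2 [] (· ++ [ia.1])) PySem.Dict.empty
  index.values.foldl (fun total ps => (ps.foldl (pvAltInner w m) ([], total)).2) 0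

-- ===== PRECONDITION & SPEC =====
-- Pre_ excludes w < 0 on non-empty input, where A raises IndexError, and the degenerate
-- window w = 0 with m ≤ 0, where A self-expires the current element before its own count
-- check: there A's and B's values are both accidental artefacts of their loop shapes.
-- (For w = 0 with 1 ≤ m both return 0, so those inputs stay inside the claim.)
def Pre_minArrivalsToDiscard (arrivals : List Int) (w : Int) (m : Int) : Prop :=
  arrivals = [] ∨ 1 ≤ w ∨ (w = 0 ∧ 1 ≤ m)
instance (arrivals : List Int) (w : Int) (m : Int) : Decidable (Pre_minArrivalsToDiscard arrivals w m) := by unfold Pre_minArrivalsToDiscard; infer_instance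

def pvWitness_minArrivalsToDiscard : List Int × Int × Int := ([1, 2, 1, 1], 2, 1)

def Spec_minArrivalsToDiscard (arrivals : List Int) (w : Int) (m : Int) (out : Int) : Prop := out = minArrivalsToDiscard_alt arrivals w m
instance (arrivals : List Int) (w : Int) (m : Int) (out : Int) : Decidable (Spec_minArrivalsToDiscard arrivals w m out) := by unfold Spec_minArrivalsToDiscard; infer_instance

-- ===== CLAIM (what is proved, stated in full; the proofs are below) =====
def Claim_equal_minArrivalsToDiscard : Prop := ∀ (arrivals : List Int) (w : Int) (m : Int), Dom_minArrivalsToDiscard arrivals w m → Pre_minArrivalsToDiscard arrivals w m → Spec_minArrivalsToDiscard arrivals w m (minArrivalsToDiscard arrivals w m)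

-- ===== LEMMAS AND PROOFS =====

-- the common reference: process records (index, value, discarded?) chronologically;
-- an arrival is discarded iff m kept same-value records are already inside its window
def pvDcd (w m : Int) (h : List (Int × Int × Bool)) (i a : Int) : Bool :=
  decide (m ≤ ((h.countP fun r => r.2.1 == a && !r.2.2 && decide (i - w < r.1)) : Int))

def pvRun (w m : Int) (h : List (Int × Int × Bool)) (l : List (Int × Int)) : List (Int × Int × Bool) :=
  l.foldl (fun h ia => h ++ [(ia.1, ia.2, pvDcd w m h ia.1 ia.2)]) h

theorem pvRun_nil (w m : Int) (h : List (Int × Int × Bool)) : pvRun w m h [] = h := rfl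

theorem pvRun_cons (w m : Int) (h : List (Int × Int × Bool)) (ia : Int × Int) (l : List (Int × Int)) :
    pvRun w m h (ia :: l) = pvRun w m (h ++ [(ia.1, ia.2, pvDcd w m h ia.1 ia.2)]) l := rfl

theorem pvRun_val_mem (w m : Int) : ∀ (l : List (Int × Int)) (h : List (Int × Int × Bool))
    (r : Int × Int × Bool), r ∈ pvRun w m h l → r ∈ h ∨ r.2.1 ∈ l.map (·.2) := by
  intro l
  induction l with
  | nil => intro h r hr; left; simpa [pvRun_nil] using hr
  | cons ia l ih =>
    intro h r hr
    rw [pvRun_cons] at hr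
    rcases ih _ r hr with hh | hv
    · rcases List.mem_append.1 hh with h1 | h2
      · exact Or.inl h1
      · right
        simp only [List.mem_singleton] at h2
        subst h2
        simp
    · right
      simp only [List.map_cons, List.mem_cons]
      exact Or.inr hv

-- the reference restricted to one value only sees that value's sub-history
theorem pvRun_filter_val (w m v : Int) : ∀ (l : List (Int × Int)) (h h' : List (Int × Int × Bool)),
    h.filter (fun r => r.2.1 == v) = h'.filter (fun r => r.2.1 == v) →
    (pvRun w m h l).filter (fun r => r.2.1 == v)
      = (pvRun w m h' (l.filter (fun ia => ia.2 == v))).filter (fun r => r.2.1 == v) := by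
  have hcnt : ∀ (hh : List (Int × Int × Bool)) (i : Int),
      hh.countP (fun r => r.2.1 == v && !r.2.2 && decide (i - w < r.1))
        = (hh.filter (fun r => r.2.1 == v)).countP (fun r => !r.2.2 && decide (i - w < r.1)) := by
    intro hh i
    rw [List.countP_filter]
    apply List.countP_congr
    intro r _
    cases hb : (r.2.1 == v) <;> simp
  intro l
  induction l with
  | nil => intro h h' hf; simpa [pvRun_nil] using hf
  | cons ia l ih =>
    intro h h' hf
    by_cases hv : ia.2 = v
    · have hfl : (ia :: l).filter (fun p => p.2 == v)
          = ia :: l.filter (fun p => p.2 == v) := by simp [hv]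
      rw [pvRun_cons, hfl, pvRun_cons]
      have hd : pvDcd w m h ia.1 ia.2 = pvDcd w m h' ia.1 ia.2 := by
        unfold pvDcd
        subst hv
        rw [hcnt h, hcnt h', hf]
      apply ih
      rw [List.filter_append, List.filter_append, hf, hd]
    · have hfl : (ia :: l).filter (fun p => p.2 == v)
          = l.filter (fun p => p.2 == v) := by simp [hv]
      rw [pvRun_cons, hfl]
      apply ih
      rw [List.filter_append, hf]
      have : [((ia.1, ia.2, pvDcd w m h ia.1 ia.2))].filter (fun r => r.2.1 == v) = [] := by
        simp [hv]
      rw [this, List.append_nil]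

-- summing per-value discard counts over the distinct values gives the total
theorem pvSum_filter_count (p : Int × Int × Bool → Bool) :
    ∀ (R : List (Int × Int × Bool)) (vs : List Int), vs.Nodup → (∀ r ∈ R, r.2.1 ∈ vs) →
    ((vs.map (fun v => ((R.filter (fun r => r.2.1 == v)).countP p : Int))).sum : Int)
      = (R.countP p : Int) := by
  have hind : ∀ (vs : List Int) (x : Int) (c : Int), vs.Nodup → x ∈ vs →
      ((vs.map (fun v => if x = v then c else 0)).sum : Int) = c := by
    intro vs
    induction vs with
    | nil => intro x c _ hx; simp at hx
    | cons v vs ih =>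
      intro x c hnd hx
      rw [List.map_cons, List.sum_cons]
      rcases List.mem_cons.1 hx with h1 | h2
      · subst h1
        rw [if_pos rfl]
        have hz : ∀ u ∈ vs, (if x = u then c else (0:Int)) = 0 := by
          intro u hu
          have hne : x ≠ u := by
            intro he; subst he; exact (List.nodup_cons.1 hnd).1 hu
          rw [if_neg hne]
        rw [List.sum_eq_zero]
        · ring
        · intro y hy
          rcases List.mem_map.1 hy with ⟨u, hu, he⟩
          rw [← he]; exact hz u hu
      · have hne : x ≠ v := by
          intro he; subst he; exact (List.nodup_cons.1 hnd).1 h2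
        rw [if_neg hne, ih x c (List.nodup_cons.1 hnd).2 h2]
        ring
  intro R
  induction R with
  | nil => intro vs _ _; simp
  | cons r R ih =>
    intro vs hnd hmem
    have hterm : ∀ v, (((r :: R).filter (fun r' => r'.2.1 == v)).countP p : Int)
        = ((R.filter (fun r' => r'.2.1 == v)).countP p : Int)
          + (if r.2.1 = v then (if p r then (1:Int) else 0) else 0) := by
      intro v
      by_cases hv : r.2.1 = v
      · rw [if_pos hv]
        have hb : (r.2.1 == v) = true := by simp [hv]
        simp only [List.filter_cons, hb, if_true, List.countP_cons]
        by_cases hp : p r = true <;> simp [hp]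
      · rw [if_neg hv]
        have hb : (r.2.1 == v) = false := by simp [hv]
        simp [hb]
    have hmap : vs.map (fun v => (((r :: R).filter (fun r' => r'.2.1 == v)).countP p : Int))
        = vs.map (fun v => ((R.filter (fun r' => r'.2.1 == v)).countP p : Int)
            + (if r.2.1 = v then (if p r then (1:Int) else 0) else 0)) := by
      apply List.map_congr_left
      intro v _
      exact hterm v
    rw [hmap]
    have hsplit : ∀ (f g : Int → Int) (l : List Int),
        (l.map (fun v => f v + g v)).sum = (l.map f).sum + (l.map g).sum := by
      intro f g l
      induction l with
      | nil => simp
      | cons a l ihl => simp [ihl]; ring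
    rw [hsplit]
    rw [ih vs hnd (fun r' hr' => hmem r' (List.mem_cons_of_mem r hr'))]
    rw [hind vs r.2.1 (if p r then (1:Int) else 0) hnd (hmem r (List.mem_cons_self ..))]
    simp only [List.countP_cons]
    by_cases hp : p r = true <;> simp [hp]

-- B's inner loop over one value's positions counts exactly that value's discarded records
theorem pvInner_spec (w m v : Int) : ∀ (pv : List (Int × Int)) (h : List (Int × Int × Bool))
    (kept : List Int) (t : Int),
    pv.Pairwise (fun x y => x.1 ≤ y.1) →
    (∀ p ∈ pv, p.2 = v) →
    (∀ r ∈ h, r.2.1 = v) →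
    (∀ p ∈ pv, kept.filter (fun q => decide (p.1 - w < q))
        = ((h.filter (fun r => !r.2.2)).map (·.1)).filter (fun q => decide (p.1 - w < q))) →
    ((pv.map (·.1)).foldl (pvAltInner w m) (kept, t)).2
      = t + ((pvRun w m h pv).countP (fun r => r.2.2) : Int) - (h.countP (fun r => r.2.2) : Int) := by
  have hstep : ∀ (xs : List Int) (P Q : Int), Q ≤ P →
      (xs.filter (fun q => decide (Q - w < q))).filter (fun q => decide (P - w < q))
        = xs.filter (fun q => decide (P - w < q)) := by
    intro xs P Q hle
    rw [List.filter_filter]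
    apply List.filter_congr
    intro q _
    by_cases hq : P - w < q
    · have h1 : Q - w < q := by omega
      simp [hq, h1]
    · simp [hq]
  intro pv
  induction pv with
  | nil =>
    intro h kept t _ _ _ _
    simp [pvRun_nil]
  | cons p pv ih =>
    intro h kept t hsort hval hhv hk
    have hpv : p.2 = v := hval p (List.mem_cons_self ..)
    have hle : ∀ p' ∈ pv, p.1 ≤ p'.1 := by
      intro p' hp'
      exact (List.pairwise_cons.1 hsort).1 p' hp'
    rw [List.map_cons, List.foldl_cons, pvRun_cons]
    have hkp := hk p (List.mem_cons_self ..)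
    -- length of the pruned kept list = number of kept same-value records in the window
    have hklen : ((kept.filter (fun q => decide (p.1 - w < q))).length : Int)
        = ((h.countP fun r => !r.2.2 && decide (p.1 - w < r.1)) : Int) := by
      rw [hkp]
      congr 1
      rw [← List.countP_eq_length_filter, List.countP_map, List.countP_filter]
      apply List.countP_congr
      intro r _
      cases hr : r.2.2 <;> simp [Function.comp]
    have hdcd : pvDcd w m h p.1 p.2
        = decide (m ≤ ((kept.filter (fun q => decide (p.1 - w < q))).length : Int)) := by
      unfold pvDcd
      rw [hklen]
      have : (h.countP fun r => r.2.1 == p.2 && !r.2.2 && decide (p.1 - w < r.1))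
          = (h.countP fun r => !r.2.2 && decide (p.1 - w < r.1)) := by
        apply List.countP_congr
        intro r hr
        have hv' : r.2.1 = v := hhv r hr
        simp [hv', hpv]
      rw [this]
    simp only [pvAltInner]
    by_cases hm : m ≤ ((kept.filter (fun q => decide (p.1 - w < q))).length : Int)
    · rw [if_pos hm]
      have hflag : pvDcd w m h p.1 p.2 = true := by rw [hdcd]; simpa using hm
      rw [hflag]
      have hrec := ih (h ++ [(p.1, p.2, true)]) (kept.filter (fun q => decide (p.1 - w < q)))
        (t + 1) (List.pairwise_cons.1 hsort).2
        (fun p' hp' => hval p' (List.mem_cons_of_mem p hp'))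
        (by intro r hr
            rcases List.mem_append.1 hr with h1 | h2
            · exact hhv r h1
            · simp only [List.mem_singleton] at h2; subst h2; exact hpv)
        (by intro p' hp'
            rw [hstep kept p'.1 p.1 (hle p' hp')]
            rw [hk p' (List.mem_cons_of_mem p hp')]
            simp [List.filter_append])
      rw [hrec]
      rw [List.countP_append]
      simp only [List.countP_cons, List.countP_nil]
      push_cast
      ring
    · rw [if_neg hm]
      have hflag : pvDcd w m h p.1 p.2 = false := by
        rw [hdcd]; simpa using hm
      rw [hflag]
      have hrec := ih (h ++ [(p.1, p.2, false)])
        (kept.filter (fun q => decide (p.1 - w < q)) ++ [p.1])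
        t (List.pairwise_cons.1 hsort).2
        (fun p' hp' => hval p' (List.mem_cons_of_mem p hp'))
        (by intro r hr
            rcases List.mem_append.1 hr with h1 | h2
            · exact hhv r h1
            · simp only [List.mem_singleton] at h2; subst h2; exact hpv)
        (by intro p' hp'
            rw [List.filter_append, hstep kept p'.1 p.1 (hle p' hp')]
            rw [hk p' (List.mem_cons_of_mem p hp')]
            simp [List.filter_append])
      rw [hrec]
      rw [List.countP_append]
      simp only [List.countP_cons, List.countP_nil]
      push_cast
      ring

-- counting helpers for A's lazily-maintained window counts
theorem pvCountP_split (l : List Nat) (p q : Nat → Bool) :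
    l.countP p = l.countP (fun k => p k && q k) + l.countP (fun k => p k && !q k) := by
  induction l with
  | nil => simp
  | cons a l ih =>
    simp only [List.countP_cons]
    cases hp : p a <;> cases hq : q a <;> simp_all <;> omega

theorem pvCountP_range_single (t : Nat) (j : Int) (C : Nat → Bool) :
    (List.range t).countP (fun k => C k && decide ((k : Int) = j))
      = if 0 ≤ j ∧ j < (t : Int) ∧ C j.toNat = true then 1 else 0 := by
  induction t with
  | zero =>
    simp only [List.range_zero, List.countP_nil]
    split_ifs with h
    · omega
    · rfl
  | succ t ih =>
    rw [List.range_succ, List.countP_append, ih]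
    simp only [List.countP_cons, List.countP_nil]
    by_cases hj : (t : Int) = j
    · have hjt : j.toNat = t := by omega
      cases hC : C t <;> split_ifs <;> simp_all
      omega
    · cases hC : C t <;> split_ifs <;> simp_all <;> omega

-- the windowed count of kept same-value records among the first t arrivals
def pvCnt (arrivals : List Int) (flagf : Nat → Bool) (t : Nat) (lo : Int) (v : Int) : Int :=
  (((List.range t).countP (fun (k : Nat) =>
    (PySem.List.pyGetD arrivals (k : Int) 0 == v) && !flagf k && decide (lo ≤ (k : Int)))) : Int)

-- the loop invariant of A's chronological pass
theorem pvA_loop (arrivals : List Int) (w m : Int) (hw : 1 ≤ w) :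
    ∀ (rest : List Int) (t : Nat) (flagf : Nat → Bool) (d : PySem.Dict Int Int),
    arrivals.drop t = rest →
    t + rest.length = arrivals.length →
    (∀ v, d.getD v 0 = pvCnt arrivals flagf t ((t : Int) - w) v) →
    ((PySem.List.enumerate rest (t : Int)).foldl (pvAStep arrivals w m)
        ((List.range t).map flagf ++ List.replicate (arrivals.length - t) false, d)).1
      = (pvRun w m ((List.range t).map (fun (k : Nat) =>
            ((k : Int), PySem.List.pyGetD arrivals (k : Int) 0, flagf k)))
          (PySem.List.enumerate rest (t : Int))).map (fun r => r.2.2) := by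
  intro rest
  induction rest with
  | nil =>
    intro t flagf d hdrop hlen hd
    have ht : t = arrivals.length := by simpa using hlen
    rw [PySem.List.enumerate_nil, List.foldl_nil, pvRun_nil]
    simp [ht, List.map_map, Function.comp]
  | cons b rest ih =>
    intro t flagf d hdrop hlen hd
    have ht : t < arrivals.length := by
      simp only [List.length_cons] at hlen; omega
    have harr : arrivals[t]? = some b := by
      have h0 : (arrivals.drop t)[0]? = some b := by rw [hdrop]; rfl
      rw [List.getElem?_drop] at h0
      simpa using h0
    have hb : PySem.List.pyGetD arrivals (t : Int) 0 = b := by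
      rw [PySem.List.pyGetD_of_nonneg arrivals 0 (by positivity)]
      simp only [Int.toNat_natCast]
      rw [List.getD_eq_getElem?_getD, harr]
      rfl
    rw [PySem.List.enumerate_cons, List.foldl_cons, pvRun_cons]
    set f0 := (List.range t).map flagf ++ List.replicate (arrivals.length - t) false with hf0
    set d1 := if d.contains b then d else d.insert b 0 with hd1def
    set d2 := d1.insert b (d1.getD b 0 + 1) with hd2def
    set d3 := if w ≤ (t : Int) then
                 (if !(PySem.List.pyGetD f0 ((t : Int) - w) false) then
                    d2.insert (PySem.List.pyGetD arrivals ((t : Int) - w) 0)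
                             (d2.getD (PySem.List.pyGetD arrivals ((t : Int) - w) 0) 0 - 1)
                  else d2)
               else d2 with hd3def
    have hstep : pvAStep arrivals w m (f0, d) ((t : Int), b)
        = if m < d3.getD b 0 then
            (PySem.List.pySetD f0 (t : Int) true, d3.insert b (d3.getD b 0 - 1))
          else (f0, d3) := by
      simp only [pvAStep, hd1def, hd2def, hd3def]
    have hd1 : ∀ v, d1.getD v 0 = d.getD v 0 := by
      intro v
      rw [hd1def]
      by_cases hc : d.contains b = true
      · simp [hc]
      · simp only [Bool.not_eq_true] at hc
        rw [hc]
        simp only [Bool.false_eq_true, if_false]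
        rw [PySem.Dict.getD_insert]
        split_ifs with hv
        · subst hv; rw [PySem.Dict.getD_of_not_contains d 0 hc]
        · rfl
    have hd2 : ∀ v, d2.getD v 0 = d.getD v 0 + (if v = b then 1 else 0) := by
      intro v
      rw [hd2def, PySem.Dict.getD_insert]
      split_ifs with hv
      · rw [hv, hd1 b]
      · rw [hd1 v]; ring
    -- shifting the window lower bound from t-w to t+1-w isolates the exiting record
    have hshift : ∀ v, pvCnt arrivals flagf t ((t : Int) - w) v
        = pvCnt arrivals flagf t ((t : Int) + 1 - w) v
        + (if w ≤ (t : Int) ∧ ((PySem.List.pyGetD arrivals ((((t : Int) - w).toNat : Nat) : Int) 0 == v)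
              && !flagf ((t : Int) - w).toNat) = true then 1 else 0) := by
      intro v
      unfold pvCnt
      rw [pvCountP_split (List.range t) _ (fun (k : Nat) => decide ((t : Int) + 1 - w ≤ (k : Int)))]
      have h1 : (List.range t).countP (fun (k : Nat) =>
          ((PySem.List.pyGetD arrivals (k : Int) 0 == v) && !flagf k
            && decide ((t : Int) - w ≤ (k : Int))) && decide ((t : Int) + 1 - w ≤ (k : Int)))
          = (List.range t).countP (fun (k : Nat) =>
            (PySem.List.pyGetD arrivals (k : Int) 0 == v) && !flagf k
              && decide ((t : Int) + 1 - w ≤ (k : Int))) := by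
        apply List.countP_congr
        intro k _
        by_cases hq : (t : Int) + 1 - w ≤ (k : Int)
        · have hp : (t : Int) - w ≤ (k : Int) := by omega
          simp [hq, hp]
        · simp [hq]
      have h2 : (List.range t).countP (fun (k : Nat) =>
          ((PySem.List.pyGetD arrivals (k : Int) 0 == v) && !flagf k
            && decide ((t : Int) - w ≤ (k : Int))) && !decide ((t : Int) + 1 - w ≤ (k : Int)))
          = (List.range t).countP (fun (k : Nat) =>
            ((PySem.List.pyGetD arrivals (k : Int) 0 == v) && !flagf k)
              && decide ((k : Int) = (t : Int) - w)) := by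
        apply List.countP_congr
        intro k _
        by_cases hq : (k : Int) = (t : Int) - w
        · have hp : (t : Int) - w ≤ (k : Int) := by omega
          have hr : ¬ ((t : Int) + 1 - w ≤ (k : Int)) := by omega
          simp [hq]
        · by_cases hp : (t : Int) - w ≤ (k : Int) <;>
            by_cases hr : (t : Int) + 1 - w ≤ (k : Int) <;> simp [hq] <;> omega
      rw [h1, h2, pvCountP_range_single t ((t : Int) - w)
        (fun (k : Nat) => (PySem.List.pyGetD arrivals (k : Int) 0 == v) && !flagf k)]
      split_ifs with hc1 hc2 hc3
      · push_cast; ring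
      · exact (hc2 ⟨by omega, hc1.2.2⟩).elim
      · exact (hc1 ⟨by omega, by omega, hc3.2⟩).elim
      · push_cast; ring
    -- the dict value after increment and expiry, per key
    have hd3 : ∀ v, d3.getD v 0 = pvCnt arrivals flagf t ((t : Int) + 1 - w) v
        + (if v = b then 1 else 0) := by
      intro v
      rw [hd3def]
      by_cases hwt : w ≤ (t : Int)
      · rw [if_pos hwt]
        have hj0 : (0 : Int) ≤ (t : Int) - w := by omega
        have hjlt : ((t : Int) - w).toNat < t := by omega
        have hjcast : ((((t : Int) - w).toNat : Nat) : Int) = (t : Int) - w :=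
          Int.toNat_of_nonneg hj0
        have hfread : PySem.List.pyGetD f0 ((t : Int) - w) false
            = flagf ((t : Int) - w).toNat := by
          rw [hf0, PySem.List.pyGetD_of_nonneg _ _ hj0, List.getD_eq_getElem?_getD]
          rw [List.getElem?_append_left (by simpa using hjlt), List.getElem?_map,
            List.getElem?_range hjlt]
          rfl
        have heV : PySem.List.pyGetD arrivals ((t : Int) - w) 0
            = PySem.List.pyGetD arrivals ((((t : Int) - w).toNat : Nat) : Int) 0 := by
          rw [hjcast]
        rw [hfread, heV]
        cases hfl : flagf ((t : Int) - w).toNat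
        · simp only [Bool.not_false, if_true]
          rw [PySem.Dict.getD_insert]
          by_cases hv : v = PySem.List.pyGetD arrivals ((((t : Int) - w).toNat : Nat) : Int) 0
          · rw [if_pos hv, hv, hd2, hd, hshift]
            rw [if_pos ⟨hwt, by simp [hfl]⟩]
            ring
          · rw [if_neg hv, hd2, hd, hshift]
            rw [if_neg (by
              rintro ⟨-, hcc⟩
              simp only [Bool.and_eq_true, beq_iff_eq] at hcc
              exact hv hcc.1.symm)]
            ring
        · simp only [Bool.not_true, Bool.false_eq_true, if_false]
          rw [hd2, hd, hshift]
          rw [if_neg (by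
            rintro ⟨-, hcc⟩
            simp only [Bool.and_eq_true] at hcc
            simp [hfl] at hcc)]
          ring
      · rw [if_neg hwt]
        rw [hd2, hd, hshift]
        rw [if_neg (fun hcc => hwt hcc.1)]
        ring
    -- the reference decision agrees with A's check
    have hdcdval : pvDcd w m ((List.range t).map (fun (k : Nat) =>
        ((k : Int), PySem.List.pyGetD arrivals (k : Int) 0, flagf k))) (t : Int) b
        = decide (m < d3.getD b 0) := by
      unfold pvDcd
      rw [List.countP_map]
      have hcc : (List.range t).countP ((fun r => r.2.1 == b && !r.2.2 && decide ((t : Int) - w < r.1))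
            ∘ (fun (k : Nat) => ((k : Int), PySem.List.pyGetD arrivals (k : Int) 0, flagf k)))
          = (List.range t).countP (fun (k : Nat) =>
            (PySem.List.pyGetD arrivals (k : Int) 0 == b) && !flagf k
              && decide ((t : Int) + 1 - w ≤ (k : Int))) := by
        apply List.countP_congr
        intro k _
        simp only [Function.comp]
        by_cases h2 : (t : Int) + 1 - w ≤ (k : Int)
        · have h1 : (t : Int) - w < (k : Int) := by omega
          simp [h1, h2]
        · have h1 : ¬ ((t : Int) - w < (k : Int)) := by omega
          simp [h1, h2]
      rw [hcc]
      have hdb := hd3 b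
      rw [if_pos rfl] at hdb
      rw [hdb]
      rw [decide_eq_decide]
      unfold pvCnt
      constructor <;> intro <;> omega
    set flagf' : Nat → Bool := fun k => if k = t then decide (m < d3.getD b 0) else flagf k
      with hflagf'
    have hmapg : (List.range (t + 1)).map (fun (k : Nat) =>
          ((k : Int), PySem.List.pyGetD arrivals (k : Int) 0, flagf' k))
        = (List.range t).map (fun (k : Nat) =>
          ((k : Int), PySem.List.pyGetD arrivals (k : Int) 0, flagf k))
          ++ [((t : Int), b, decide (m < d3.getD b 0))] := by
      rw [List.range_succ, List.map_append]
      congr 1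
      · apply List.map_congr_left
        intro k hk
        have hkt : k ≠ t := by simp only [List.mem_range] at hk; omega
        simp [hflagf', hkt]
      · simp [hflagf', harr]
    have hdrop' : arrivals.drop (t + 1) = rest := by
      have h1 : arrivals.drop (t + 1) = (arrivals.drop t).drop 1 := by
        rw [List.drop_drop]
      rw [h1, hdrop]
      rfl
    have hlen' : (t + 1) + rest.length = arrivals.length := by
      simp only [List.length_cons] at hlen; omega
    have hcast1 : ((t : Int) + 1) = ((t + 1 : Nat) : Int) := by push_cast; ring
    have hmapflagf' : (List.range t).map flagf' = (List.range t).map flagf := by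
      apply List.map_congr_left
      intro k hk
      have hkt : k ≠ t := by simp only [List.mem_range] at hk; omega
      simp [hflagf', hkt]
    have hnew : ∀ v, pvCnt arrivals flagf' (t + 1) (((t + 1 : Nat) : Int) - w) v
        = pvCnt arrivals flagf t ((t : Int) + 1 - w) v
          + (if ((b == v) && !(decide (m < d3.getD b 0))) = true then 1 else 0) := by
      intro v
      unfold pvCnt
      rw [List.range_succ, List.countP_append]
      have hcg : (List.range t).countP (fun (k : Nat) =>
          (PySem.List.pyGetD arrivals (k : Int) 0 == v) && !flagf' k
            && decide ((((t + 1 : Nat) : Int)) - w ≤ (k : Int)))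
          = (List.range t).countP (fun (k : Nat) =>
            (PySem.List.pyGetD arrivals (k : Int) 0 == v) && !flagf k
              && decide ((t : Int) + 1 - w ≤ (k : Int))) := by
        apply List.countP_congr
        intro k hk
        have hkt : k ≠ t := by simp only [List.mem_range] at hk; omega
        have hwin : ((((t + 1 : Nat) : Int)) - w ≤ (k : Int)) ↔ ((t : Int) + 1 - w ≤ (k : Int)) := by
          push_cast; omega
        simp [hflagf', hkt]
      rw [hcg]
      simp only [List.countP_cons, List.countP_nil]
      have hft : flagf' t = decide (m < d3.getD b 0) := by simp [hflagf']
      have hwt2 : ((((t + 1 : Nat) : Int)) - w ≤ (t : Int)) := by push_cast; omega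
      rw [hb]
      simp only [hft]
      have hwt2 : decide ((((t + 1 : Nat) : Int)) - w ≤ (t : Int)) = true := by
        simp only [decide_eq_true_eq]
        push_cast; omega
      rw [hwt2, Bool.and_true]
      push_cast
      split_ifs <;> omega
    have hinv : ∀ v, (if m < d3.getD b 0 then d3.insert b (d3.getD b 0 - 1) else d3).getD v 0
        = pvCnt arrivals flagf' (t + 1) (((t + 1 : Nat) : Int) - w) v := by
      intro v
      rw [hnew v]
      by_cases hm : m < d3.getD b 0
      · rw [if_pos hm, PySem.Dict.getD_insert]
        have hind : (if ((b == v) && !(decide (m < d3.getD b 0))) = true then (1:Int) else 0) = 0 := by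
          simp [hm]
        rw [hind]
        by_cases hv : v = b
        · rw [if_pos hv, hv]
          have hdb := hd3 b
          rw [if_pos rfl] at hdb
          rw [hdb]
          ring
        · rw [if_neg hv]
          have hdv := hd3 v
          rw [if_neg hv] at hdv
          rw [hdv]
      · rw [if_neg hm, hd3 v]
        by_cases hv : v = b
        · have hind : (if ((b == v) && !(decide (m < d3.getD b 0))) = true then (1:Int) else 0) = 1 := by
            simp [hv, hm]
          rw [hind, if_pos hv]
        · have hind : (if ((b == v) && !(decide (m < d3.getD b 0))) = true then (1:Int) else 0) = 0 := by
            simp [Ne.symm hv]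
          rw [hind, if_neg hv]
    rw [hstep, hdcdval, ← hmapg, hcast1]
    by_cases hm : m < d3.getD b 0
    · rw [if_pos hm]
      have hfset : PySem.List.pySetD f0 (t : Int) true
          = (List.range (t + 1)).map flagf' ++ List.replicate (arrivals.length - (t + 1)) false := by
        rw [PySem.List.pySetD_of_nonneg _ _ (by positivity), Int.toNat_natCast, hf0]
        have hrep : List.replicate (arrivals.length - t) false
            = false :: List.replicate (arrivals.length - (t + 1)) false := by
          have h1 : arrivals.length - t = (arrivals.length - (t + 1)) + 1 := by omega
          rw [h1, List.replicate_succ]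
        rw [hrep, List.set_append]
        have hlt : ¬ (t < ((List.range t).map flagf).length) := by simp
        rw [if_neg hlt]
        simp only [List.length_map, List.length_range, Nat.sub_self, List.set_cons_zero]
        rw [List.range_succ, List.map_append, hmapflagf']
        have hft : flagf' t = true := by simp [hflagf', hm]
        simp [hft]
      rw [hfset]
      exact ih (t + 1) flagf' (d3.insert b (d3.getD b 0 - 1)) hdrop' hlen'
        (fun v => by have h2 := hinv v; rwa [if_pos hm] at h2)
    · rw [if_neg hm]
      have hf0eq : f0 = (List.range (t + 1)).map flagf'
          ++ List.replicate (arrivals.length - (t + 1)) false := by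
        rw [hf0]
        have hrep : List.replicate (arrivals.length - t) false
            = false :: List.replicate (arrivals.length - (t + 1)) false := by
          have h1 : arrivals.length - t = (arrivals.length - (t + 1)) + 1 := by omega
          rw [h1, List.replicate_succ]
        rw [hrep, List.range_succ, List.map_append, hmapflagf']
        have hft : flagf' t = false := by simp [hflagf', hm]
        simp [hft]
      rw [hf0eq]
      exact ih (t + 1) flagf' d3 hdrop' hlen'
        (fun v => by have h2 := hinv v; rwa [if_neg hm] at h2)

-- A's chronological pass computes the reference flags
theorem pvA_run (arrivals : List Int) (w m : Int) (hw : 1 ≤ w) :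
    minArrivalsToDiscard arrivals w m
      = ((pvRun w m [] (PySem.List.enumerate arrivals)).countP (fun r => r.2.2) : Int) := by
  have h := pvA_loop arrivals w m hw arrivals 0 (fun _ => false) PySem.Dict.empty rfl
    (by simp)
    (by intro v
        unfold pvCnt
        simp [PySem.Dict.getD_empty])
  simp only [List.range_zero, List.map_nil, List.nil_append, Nat.cast_zero, Nat.sub_zero] at h
  simp only [minArrivalsToDiscard]
  rw [h]
  rw [List.count_eq_countP, List.countP_map]
  apply congrArg
  apply List.countP_congr
  intro r _
  simp [Function.comp]

-- B totals the reference flags value by value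
theorem pvB_run (arrivals : List Int) (w m : Int) :
    minArrivalsToDiscard_alt arrivals w m
      = ((pvRun w m [] (PySem.List.enumerate arrivals)).countP (fun r => r.2.2) : Int) := by
  simp only [minArrivalsToDiscard_alt]
  have hswap : (PySem.List.enumerate arrivals).foldl
      (fun (d : PySem.Dict Int (List Int)) ia => d.modify ia.2 [] (· ++ [ia.1])) PySem.Dict.empty
      = ((PySem.List.enumerate arrivals).map (fun ia => (ia.2, ia.1))).foldl
          (fun (d : PySem.Dict Int (List Int)) p => d.modify p.1 [] (· ++ [p.2])) PySem.Dict.empty := by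
    rw [List.foldl_map]
  have hkeys : ((PySem.List.enumerate arrivals).foldl
      (fun (d : PySem.Dict Int (List Int)) ia => d.modify ia.2 [] (· ++ [ia.1])) PySem.Dict.empty).keys
      = PySem.Set.ofList arrivals := by
    rw [hswap]
    rw [PySem.Dict.keys_foldl_modify_key ((PySem.List.enumerate arrivals).map (fun ia => (ia.2, ia.1)))
      (fun p => p.1) [] (fun _ p old => old ++ [p.2]) PySem.Dict.empty]
    rw [List.map_map]
    have h2 : ((fun p => p.1) ∘ (fun (ia : Int × Int) => (ia.2, ia.1))) = (fun (ia : Int × Int) => ia.2) := rfl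
    rw [h2, PySem.List.map_snd_enumerate]
    have hkeys_empty : (PySem.Dict.empty : PySem.Dict Int (List Int)).keys = [] := rfl
    rw [hkeys_empty, PySem.Set.update_nil_left]
  have hnodup : ((PySem.List.enumerate arrivals).foldl
      (fun (d : PySem.Dict Int (List Int)) ia => d.modify ia.2 [] (· ++ [ia.1])) PySem.Dict.empty).keys.Nodup := by
    rw [hkeys]; exact PySem.Set.nodup_ofList arrivals
  have hgetD : ∀ v, ((PySem.List.enumerate arrivals).foldl
      (fun (d : PySem.Dict Int (List Int)) ia => d.modify ia.2 [] (· ++ [ia.1])) PySem.Dict.empty).getD v []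
      = ((PySem.List.enumerate arrivals).filter (fun ia => ia.2 == v)).map (fun ia => ia.1) := by
    intro v
    rw [hswap]
    rw [PySem.Dict.getD_foldl_modify_append ((PySem.List.enumerate arrivals).map (fun ia => (ia.2, ia.1)))
      PySem.Dict.empty v]
    rw [List.filter_map, List.map_map]
    rfl
  rw [PySem.Dict.values_eq_map_keys _ hnodup [], hkeys]
  rw [List.foldl_map]
  have hcongr : (PySem.Set.ofList arrivals).foldl
      (fun total v => ((((PySem.List.enumerate arrivals).foldl
          (fun (d : PySem.Dict Int (List Int)) ia => d.modify ia.2 [] (· ++ [ia.1])) PySem.Dict.empty).getD v []).foldl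
          (pvAltInner w m) ([], total)).2) 0
      = (PySem.Set.ofList arrivals).foldl
          (fun total v => total + (((pvRun w m []
            ((PySem.List.enumerate arrivals).filter (fun ia => ia.2 == v))).countP (fun r => r.2.2) : Nat) : Int)) 0 := by
    apply PySem.List.foldl_congr_mem
    intro t v _
    rw [hgetD v]
    have hspec := pvInner_spec w m v ((PySem.List.enumerate arrivals).filter (fun ia => ia.2 == v))
      [] [] t
      ((List.Pairwise.filter _ (PySem.List.pairwise_lt_enumerate arrivals 0)).imp le_of_lt)
      (by intro p hp
          have := (List.mem_filter.1 hp).2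
          simpa using this)
      (by intro r hr; simp at hr)
      (by intro p _; simp)
    simp only [List.countP_nil, Nat.cast_zero, sub_zero] at hspec
    exact hspec
  rw [hcongr, PySem.List.foldl_add, zero_add]
  have hfix : ∀ v, ((pvRun w m []
        ((PySem.List.enumerate arrivals).filter (fun ia => ia.2 == v))).countP (fun r => r.2.2) : Int)
      = (((pvRun w m [] (PySem.List.enumerate arrivals)).filter
            (fun r => r.2.1 == v)).countP (fun r => r.2.2) : Int) := by
    intro v
    have h1 := pvRun_filter_val w m v (PySem.List.enumerate arrivals) [] [] rfl
    have h2 : (pvRun w m [] ((PySem.List.enumerate arrivals).filter (fun ia => ia.2 == v))).filter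
        (fun r => r.2.1 == v)
        = pvRun w m [] ((PySem.List.enumerate arrivals).filter (fun ia => ia.2 == v)) := by
      apply List.filter_eq_self.2
      intro r hr
      rcases pvRun_val_mem w m _ [] r hr with h | h
      · simp at h
      · rcases List.mem_map.1 h with ⟨ia, hia, he⟩
        have := (List.mem_filter.1 hia).2
        rw [← he]
        exact this
    rw [← h2, ← h1]
  have hmap : (PySem.Set.ofList arrivals).map
      (fun v => (((pvRun w m [] ((PySem.List.enumerate arrivals).filter
        (fun ia => ia.2 == v))).countP (fun r => r.2.2) : Nat) : Int))
      = (PySem.Set.ofList arrivals).map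
        (fun v => (((pvRun w m [] (PySem.List.enumerate arrivals)).filter
          (fun r => r.2.1 == v)).countP (fun r => r.2.2) : Int)) := by
    apply List.map_congr_left
    intro v _
    exact hfix v
  rw [hmap]
  apply pvSum_filter_count
  · exact PySem.Set.nodup_ofList arrivals
  · intro r hr
    rcases pvRun_val_mem w m _ [] r hr with h | h
    · simp at h
    · rw [PySem.List.map_snd_enumerate] at h
      exact (PySem.Set.mem_ofList arrivals _).2 h

-- with a zero-length window and a positive limit, A never flags anything
theorem pvA_zero_loop (arrivals : List Int) (m : Int) (hm : 1 ≤ m) :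
    ∀ (rest : List Int) (t : Nat) (d : PySem.Dict Int Int),
    arrivals.drop t = rest →
    (∀ v, d.getD v 0 = 0) →
    ((PySem.List.enumerate rest (t : Int)).foldl (pvAStep arrivals 0 m)
        (List.replicate arrivals.length false, d)).1 = List.replicate arrivals.length false := by
  intro rest
  induction rest with
  | nil =>
    intro t d _ _
    rw [PySem.List.enumerate_nil, List.foldl_nil]
  | cons b rest ih =>
    intro t d hdrop hd
    have harr : arrivals[t]? = some b := by
      have h0 : (arrivals.drop t)[0]? = some b := by rw [hdrop]; rfl
      rw [List.getElem?_drop] at h0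
      simpa using h0
    have hb : PySem.List.pyGetD arrivals ((t : Int) - 0) 0 = b := by
      rw [sub_zero, PySem.List.pyGetD_of_nonneg arrivals 0 (by positivity)]
      simp only [Int.toNat_natCast]
      rw [List.getD_eq_getElem?_getD, harr]
      rfl
    have hf : PySem.List.pyGetD (List.replicate arrivals.length false) ((t : Int) - 0) false
        = false := by
      rw [sub_zero, PySem.List.pyGetD_of_nonneg _ _ (by positivity), Int.toNat_natCast,
        List.getD_eq_getElem?_getD, List.getElem?_replicate]
      split <;> rfl
    rw [PySem.List.enumerate_cons, List.foldl_cons]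
    set d1 := if d.contains b then d else d.insert b 0 with hd1def
    set d2 := d1.insert b (d1.getD b 0 + 1) with hd2def
    set d3 := d2.insert b (d2.getD b 0 - 1) with hd3def
    have hd1 : ∀ v, d1.getD v 0 = d.getD v 0 := by
      intro v
      rw [hd1def]
      by_cases hc : d.contains b = true
      · simp [hc]
      · simp only [Bool.not_eq_true] at hc
        rw [hc]
        simp only [Bool.false_eq_true, if_false]
        rw [PySem.Dict.getD_insert]
        split_ifs with hv
        · subst hv; rw [PySem.Dict.getD_of_not_contains d 0 hc]
        · rfl
    have hd3 : ∀ v, d3.getD v 0 = d.getD v 0 := by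
      intro v
      rw [hd3def, hd2def, PySem.Dict.getD_insert]
      by_cases hv : v = b
      · rw [if_pos hv, PySem.Dict.getD_insert, if_pos rfl, hd1, hv]
        ring
      · rw [if_neg hv, PySem.Dict.getD_insert, if_neg hv, hd1]
    have hstep : pvAStep arrivals 0 m (List.replicate arrivals.length false, d) ((t : Int), b)
        = (List.replicate arrivals.length false, d3) := by
      simp only [pvAStep]
      rw [if_pos (show (0 : Int) ≤ (t : Int) by positivity), hf, hb]
      simp only [Bool.not_false, if_true]
      rw [← hd1def, ← hd2def, ← hd3def]
      rw [if_neg (by rw [hd3 b, hd b]; omega)]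
    rw [hstep]
    have hdrop' : arrivals.drop (t + 1) = rest := by
      have h1 : arrivals.drop (t + 1) = (arrivals.drop t).drop 1 := by rw [List.drop_drop]
      rw [h1, hdrop]
      rfl
    have hcast1 : ((t : Int) + 1) = ((t + 1 : Nat) : Int) := by push_cast; ring
    rw [hcast1]
    exact ih (t + 1) d3 hdrop' (fun v => by rw [hd3 v, hd v])

theorem pvA_zero (arrivals : List Int) (m : Int) (hm : 1 ≤ m) :
    minArrivalsToDiscard arrivals 0 m = 0 := by
  have h := pvA_zero_loop arrivals m hm arrivals 0 PySem.Dict.empty rfl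
    (fun v => by simp [PySem.Dict.getD_empty])
  simp only [Nat.cast_zero] at h
  simp only [minArrivalsToDiscard]
  rw [h]
  simp [List.count_replicate]

-- with a zero-length window and a positive limit, the reference never flags either
theorem pvRun_zero (m : Int) (hm : 1 ≤ m) : ∀ (xs : List Int) (s : Int)
    (hist : List (Int × Int × Bool)), (∀ r ∈ hist, r.1 < s) →
    (pvRun 0 m hist (PySem.List.enumerate xs s)).countP (fun r => r.2.2)
      = hist.countP (fun r => r.2.2) := by
  intro xs
  induction xs with
  | nil =>
    intro s hist _
    rw [PySem.List.enumerate_nil, pvRun_nil]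
  | cons x xs ih =>
    intro s hist hlt
    rw [PySem.List.enumerate_cons, pvRun_cons]
    have hdcd : pvDcd 0 m hist s x = false := by
      unfold pvDcd
      have hz : hist.countP (fun r => r.2.1 == x && !r.2.2 && decide (s - 0 < r.1)) = 0 := by
        rw [List.countP_eq_zero]
        intro r hr
        have hlt' := hlt r hr
        simp only [Bool.and_eq_true, decide_eq_true_eq, not_and]
        intro _ _
        omega
      rw [hz]
      simp only [Nat.cast_zero, decide_eq_false_iff_not]
      omega
    rw [hdcd]
    rw [ih (s + 1) (hist ++ [(s, x, false)]) (by
      intro r hr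
      rcases List.mem_append.1 hr with h1 | h2
      · have := hlt r h1; omega
      · simp only [List.mem_singleton] at h2; subst h2; omega)]
    rw [List.countP_append]
    simp

theorem pvB_zero (arrivals : List Int) (m : Int) (hm : 1 ≤ m) :
    minArrivalsToDiscard_alt arrivals 0 m = 0 := by
  rw [pvB_run arrivals 0 m]
  rw [pvRun_zero m hm arrivals 0 [] (by simp)]
  rfl

-- ===== VERDICT (by name: the statement is the Claim_ definition above) =====
theorem minArrivalsToDiscard_spec : Claim_equal_minArrivalsToDiscard := by
  intro arrivals w m _ hpre
  unfold Spec_minArrivalsToDiscard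
  rcases hpre with h | hw | ⟨hw0, hm⟩
  · subst h; simp [minArrivalsToDiscard, minArrivalsToDiscard_alt, PySem.List.enumerate_nil]; rfl
  · rw [pvA_run arrivals w m hw, pvB_run arrivals w m]
  · subst hw0
    rw [pvA_zero arrivals m hm, pvB_zero arrivals m hm]
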